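-- pv_equiv track=rewrite | github.com/thaddeuspearson/LS-PY110 | Practice_Problems/problem_13.py | unscramble
-- ===== SOURCE A (Python) =====
-- def get_char_counts(input_str: str) -> dict:
--     """Returns a dictionary with the characters and their respective counts"""
--     char_counts = {}
--
--     for char in input_str:
--         char_counts[char] = char_counts.get(char, 0) + 1
--
--     return char_counts
--
-- def unscramble(str_1: str, str_2: str) -> bool:
--     """
--     Returns if it is possible to rearrange some (or all) characters from the
--     first string, and create the second string.
--     """
--     str_1_char_counts = get_char_counts(str_1)
--
--     for char in str_2:
--         if char in str_1_char_counts and str_1_char_counts[char] > 0: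
--             str_1_char_counts[char] -= 1
--         else:
--             return False
--
--     return True
-- ===== SOURCE B (Python) =====
-- def unscramble(str_1: str, str_2: str) -> bool:
--     """True iff str_2 can be built from (a sub-multiset of) str_1's characters."""
--     available = list(str_1)
--     needed = list(str_2)
--     return all(needed.count(ch) <= available.count(ch) for ch in set(needed))
-- ===== Notes on version B (the rewrite author's own statement) =====
-- stated objective: idiomatic
-- what changed: Instead of building a mutable count dict from str_1 and destructively consuming it while scanning str_2 with early return, B compares per-character counts of the two strings over the distinct characters of str_2 (all(...) over set(str_2)).
import Mathlib
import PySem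

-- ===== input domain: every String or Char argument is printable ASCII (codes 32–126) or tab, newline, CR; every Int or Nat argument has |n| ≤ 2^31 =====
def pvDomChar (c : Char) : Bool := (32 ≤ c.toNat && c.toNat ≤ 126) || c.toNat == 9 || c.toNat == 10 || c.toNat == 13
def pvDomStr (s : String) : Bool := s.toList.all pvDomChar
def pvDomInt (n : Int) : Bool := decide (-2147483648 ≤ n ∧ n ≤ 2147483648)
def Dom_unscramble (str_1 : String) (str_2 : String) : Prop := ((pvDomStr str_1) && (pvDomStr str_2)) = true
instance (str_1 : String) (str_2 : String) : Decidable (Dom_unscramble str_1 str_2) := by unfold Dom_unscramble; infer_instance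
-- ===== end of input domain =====

-- B replaces A's destructively-consumed count dict by a per-distinct-character count comparison (objective: idiomatic; same behaviour, proved equal).

-- ===== PORT A =====
-- get_char_counts: char_counts[char] = char_counts.get(char, 0) + 1
def pvGetCharCounts (input_str : String) : PySem.Dict Char Int :=
  input_str.toList.foldl (fun d c => d.insert c (d.getD c 0 + 1)) PySem.Dict.empty

-- the 'for char in str_2' loop with its early 'return False'
def pvUnscrambleLoop (d : PySem.Dict Char Int) : List Char → Bool
  | [] => true
  | c :: rest =>
      match d.get? c with
      | some v => if v > 0 then pvUnscrambleLoop (d.insert c (v - 1)) rest else false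
      | none => false

def unscramble (str_1 : String) (str_2 : String) : Bool :=
  pvUnscrambleLoop (pvGetCharCounts str_1) str_2.toList

-- ===== PORT B =====
def unscramble_alt (str_1 : String) (str_2 : String) : Bool :=
  let available := str_1.toList
  let needed := str_2.toList
  (PySem.Set.ofList needed).all (fun ch => decide (needed.count ch ≤ available.count ch))

-- ===== PRECONDITION & SPEC =====
def Spec_unscramble (str_1 : String) (str_2 : String) (out : Bool) : Prop := out = unscramble_alt str_1 str_2
instance (str_1 : String) (str_2 : String) (out : Bool) : Decidable (Spec_unscramble str_1 str_2 out) := by unfold Spec_unscramble; infer_instance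

-- ===== CLAIM (what is proved, stated in full; the proofs are below) =====
def Claim_equal_unscramble : Prop := ∀ (str_1 : String) (str_2 : String), Dom_unscramble str_1 str_2 → Spec_unscramble str_1 str_2 (unscramble str_1 str_2)

-- ===== LEMMAS AND PROOFS =====

-- A's consuming loop succeeds iff every char of the remaining list has enough budget in the dict.
lemma pvUnscrambleLoop_iff (l : List Char) :
    ∀ d : PySem.Dict Char Int,
      pvUnscrambleLoop d l = true ↔ ∀ c ∈ l, (l.count c : Int) ≤ d.getD c 0 := by
  induction l with
  | nil => intro d; simp [pvUnscrambleLoop]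
  | cons c rest ih =>
    intro d
    cases h : d.get? c with
    | none =>
      have hd0 : d.getD c 0 = 0 := PySem.Dict.getD_of_get?_eq_none _ _ h
      simp only [pvUnscrambleLoop, h, Bool.false_eq_true, false_iff, not_forall]
      refine ⟨c, List.mem_cons_self, ?_⟩
      rw [hd0, List.count_cons_self]
      push_cast
      omega
    | some v =>
      have hdc : d.getD c 0 = v := PySem.Dict.getD_of_get?_eq_some _ _ h
      have hIns : ∀ x : Char, (d.insert c (v - 1)).getD x 0 = if x = c then v - 1 else d.getD x 0 :=
        fun x => PySem.Dict.getD_insert d c x (v - 1) 0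
      simp only [pvUnscrambleLoop, h]
      by_cases hv : v > 0
      · rw [if_pos hv, ih]
        constructor
        · intro hrest x hx
          rcases List.mem_cons.mp hx with hxc | hxr
          · subst hxc
            rw [hdc, List.count_cons_self]
            by_cases hm : x ∈ rest
            · have := hrest x hm
              rw [hIns, if_pos rfl] at this
              push_cast
              omega
            · rw [List.count_eq_zero_of_not_mem hm]
              omega
          · by_cases hxc : x = c
            · subst hxc
              have := hrest x hxr
              rw [hIns, if_pos rfl] at this
              rw [hdc, List.count_cons_self]
              push_cast
              omega
            · have := hrest x hxr
              rw [hIns, if_neg hxc] at this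
              rw [List.count_cons_of_ne (Ne.symm hxc)]
              exact this
        · intro hall x hx
          rw [hIns]
          by_cases hxc : x = c
          · subst hxc
            have := hall x List.mem_cons_self
            rw [hdc, List.count_cons_self] at this
            rw [if_pos rfl]
            push_cast at this ⊢
            omega
          · rw [if_neg hxc]
            have := hall x (List.mem_cons_of_mem _ hx)
            rw [List.count_cons_of_ne (Ne.symm hxc)] at this
            exact this
      · rw [if_neg hv]
        simp only [Bool.false_eq_true, false_iff, not_forall]
        refine ⟨c, List.mem_cons_self, ?_⟩
        rw [hdc, List.count_cons_self]
        push_cast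
        omega

-- A's dict built from str_1 stores exactly str_1's character counts.
lemma pvGetCharCounts_getD (s : String) (c : Char) :
    (pvGetCharCounts s).getD c 0 = (s.toList.count c : Int) := by
  unfold pvGetCharCounts
  rw [PySem.Dict.getD_foldl_insert_add_one]
  simp [PySem.Dict.getD_empty]

lemma unscramble_iff (s1 s2 : String) :
    unscramble s1 s2 = true ↔ ∀ c ∈ s2.toList, s2.toList.count c ≤ s1.toList.count c := by
  unfold unscramble
  rw [pvUnscrambleLoop_iff]
  constructor
  · intro h c hc
    have := h c hc
    rw [pvGetCharCounts_getD] at this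
    exact_mod_cast this
  · intro h c hc
    rw [pvGetCharCounts_getD]
    exact_mod_cast h c hc

lemma unscramble_alt_iff (s1 s2 : String) :
    unscramble_alt s1 s2 = true ↔ ∀ c ∈ s2.toList, s2.toList.count c ≤ s1.toList.count c := by
  unfold unscramble_alt
  simp only [List.all_eq_true, decide_eq_true_eq]
  constructor
  · intro h c hc
    exact h c ((PySem.Set.mem_ofList _ _).mpr hc)
  · intro h c hc
    exact h c ((PySem.Set.mem_ofList _ _).mp hc)

-- ===== VERDICT (by name: the statement is the Claim_ definition above) =====
theorem unscramble_spec : Claim_equal_unscramble := by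
  intro s1 s2 _
  unfold Spec_unscramble
  rw [Bool.eq_iff_iff, unscramble_iff, unscramble_alt_iff]
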